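-- pv_equiv track=rewrite | github.com/RU-Automated-Reasoning-Group/RoboVerify | roboverify/synthesis/inference_lib/inference.py | compute_all_possible_witness_permutations
-- ===== SOURCE A (Python) =====
-- import itertools
-- from typing import Dict, List, Set, Tuple
--
-- def compute_all_possible_witness_permutations(
--     n_exists: int, candidate_witness: List
-- ) -> List[List]:
--     """For each universally quantified variable, assign one constant from the input candidate_witness as the witness.
--     Return all possible witness permutations.
--     """
--     if n_exists < 0:
--         raise ValueError("n_forall must be non-negative")
--     # If there are zero universal vars, there is one empty assignment
--     if n_exists == 0:
--         return [[]]
--     # Cartesian product: allow repetition of candidates across universal vars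
--     return [list(p) for p in itertools.product(candidate_witness, repeat=n_exists)]
-- ===== SOURCE B (Python) =====
-- def compute_all_possible_witness_permutations(n_exists, candidate_witness):
--     if n_exists < 0:
--         raise ValueError("n_forall must be non-negative")
--     result = [[]]
--     for _ in range(n_exists):
--         result = [prefix + [c] for prefix in result for c in candidate_witness]
--     return result
-- ===== Notes on version B (the rewrite author's own statement) =====
-- stated objective: alternative
-- what changed: Replaces the itertools.product call with an iterative build of the Cartesian product: start from [[]] and extend every partial assignment by one candidate per round, removing the n_exists==0 special case.
import Mathlib
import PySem

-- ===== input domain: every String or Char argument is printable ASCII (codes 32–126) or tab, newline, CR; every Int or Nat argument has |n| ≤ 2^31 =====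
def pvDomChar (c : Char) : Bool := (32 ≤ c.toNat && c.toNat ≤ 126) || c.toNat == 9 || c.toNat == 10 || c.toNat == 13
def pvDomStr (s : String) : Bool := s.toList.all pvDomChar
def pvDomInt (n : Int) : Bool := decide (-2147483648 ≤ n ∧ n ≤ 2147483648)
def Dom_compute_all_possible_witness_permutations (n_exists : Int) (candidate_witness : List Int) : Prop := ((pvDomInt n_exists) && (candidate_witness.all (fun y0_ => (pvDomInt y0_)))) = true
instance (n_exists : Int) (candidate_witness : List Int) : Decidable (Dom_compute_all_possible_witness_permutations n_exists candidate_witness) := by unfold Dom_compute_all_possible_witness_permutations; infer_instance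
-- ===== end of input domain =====

-- B builds the Cartesian product iteratively (fold extending partial assignments at the back)
-- instead of A's itertools.product (front-first recursion); same cost, different decomposition.
-- Pre_ excludes n_exists < 0, where Python A raises ValueError.

-- ===== PORT A =====
-- itertools.product(candidate_witness, repeat=n): outer loop over the first position,
-- recursion for the remaining positions (product's position-major order).
def pvProdRepeat (cw : List Int) : Nat → List (List Int)
  | 0 => [[]]
  | n + 1 => cw.flatMap (fun c => (pvProdRepeat cw n).map (fun p => c :: p))

def compute_all_possible_witness_permutations (n_exists : Int) (candidate_witness : List Int) : List (List Int) :=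
  if n_exists < 0 then []  -- Python raises ValueError here; excluded by Pre_
  else if n_exists = 0 then [[]]
  else pvProdRepeat candidate_witness n_exists.toNat

-- ===== PORT B =====
def compute_all_possible_witness_permutations_alt (n_exists : Int) (candidate_witness : List Int) : List (List Int) :=
  if n_exists < 0 then []  -- Python raises ValueError here; excluded by Pre_
  else
    (PySem.List.pyRange 0 n_exists 1).foldl
      (fun result _ => result.flatMap (fun pfx => candidate_witness.map (fun c => pfx ++ [c])))
      [[]]

-- ===== PRECONDITION & SPEC =====
def Pre_compute_all_possible_witness_permutations (n_exists : Int) (candidate_witness : List Int) : Prop :=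
  0 ≤ n_exists
instance (n_exists : Int) (candidate_witness : List Int) : Decidable (Pre_compute_all_possible_witness_permutations n_exists candidate_witness) := by unfold Pre_compute_all_possible_witness_permutations; infer_instance
def pvWitness_compute_all_possible_witness_permutations : Int × List Int := (2, [1, 2])
def Spec_compute_all_possible_witness_permutations (n_exists : Int) (candidate_witness : List Int) (out : List (List Int)) : Prop := out = compute_all_possible_witness_permutations_alt n_exists candidate_witness
instance (n_exists : Int) (candidate_witness : List Int) (out : List (List Int)) : Decidable (Spec_compute_all_possible_witness_permutations n_exists candidate_witness out) := by unfold Spec_compute_all_possible_witness_permutations; infer_instance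

-- ===== CLAIM =====
def Claim_equal_compute_all_possible_witness_permutations : Prop := ∀ (n_exists : Int) (candidate_witness : List Int), Dom_compute_all_possible_witness_permutations n_exists candidate_witness → Pre_compute_all_possible_witness_permutations n_exists candidate_witness → Spec_compute_all_possible_witness_permutations n_exists candidate_witness (compute_all_possible_witness_permutations n_exists candidate_witness)

-- ===== LEMMAS AND PROOFS =====

-- one step of B's loop
def pvStep (cw : List Int) (res : List (List Int)) : List (List Int) :=
  res.flatMap (fun p => cw.map (fun c => p ++ [c]))

theorem pvStep_map_cons (cw : List Int) (c : Int) (L : List (List Int)) :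
    pvStep cw (L.map (fun p => c :: p)) = (pvStep cw L).map (fun p => c :: p) := by
  simp [pvStep, List.flatMap_map, List.map_flatMap, List.map_map]
  rfl

theorem pvStep_prodRepeat (cw : List Int) (n : Nat) :
    pvStep cw (pvProdRepeat cw n) = pvProdRepeat cw (n + 1) := by
  induction n with
  | zero =>
    show pvStep cw [[]] = cw.flatMap (fun c => [[]].map (fun p => c :: p))
    simp only [pvStep, List.flatMap_cons, List.flatMap_nil, List.map_nil, List.nil_append,
      List.append_nil, List.map_cons]
    induction cw with
    | nil => rfl
    | cons x xs ih => simp [ih]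
  | succ n ih =>
    show pvStep cw (cw.flatMap (fun c => (pvProdRepeat cw n).map (fun p => c :: p)))
        = cw.flatMap (fun c => (pvProdRepeat cw (n + 1)).map (fun p => c :: p))
    unfold pvStep
    rw [List.flatMap_assoc]
    congr 1
    funext c
    have h := pvStep_map_cons cw c (pvProdRepeat cw n)
    simp only [pvStep] at h ih
    rw [h, ih]

theorem pvFoldl_const_step (cw : List Int) (l : List Int) (init : List (List Int)) :
    l.foldl (fun res _ => pvStep cw res) init = (pvStep cw)^[l.length] init := by
  induction l generalizing init with
  | nil => rfl
  | cons x xs ih => simp [List.foldl_cons, ih, Function.iterate_succ_apply]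

theorem pvIterate_step (cw : List Int) (n : Nat) :
    (pvStep cw)^[n] [[]] = pvProdRepeat cw n := by
  induction n with
  | zero => rfl
  | succ n ih => rw [Function.iterate_succ_apply', ih, pvStep_prodRepeat]

-- ===== VERDICT =====
theorem compute_all_possible_witness_permutations_spec : Claim_equal_compute_all_possible_witness_permutations := by
  intro n cw _ hpre
  unfold Spec_compute_all_possible_witness_permutations
  unfold compute_all_possible_witness_permutations compute_all_possible_witness_permutations_alt
  have hn : ¬ n < 0 := not_lt.mpr hpre
  simp only [hn, if_false]
  have hfold : (PySem.List.pyRange 0 n 1).foldl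
      (fun result _ => result.flatMap (fun pfx => cw.map (fun c => pfx ++ [c]))) [[]]
      = pvProdRepeat cw n.toNat := by
    have h1 : (PySem.List.pyRange 0 n 1).foldl (fun res _ => pvStep cw res) [[]]
        = (pvStep cw)^[(PySem.List.pyRange 0 n 1).length] [[]] := pvFoldl_const_step cw _ _
    have h2 : (PySem.List.pyRange 0 n 1).length = n.toNat := by
      rw [PySem.List.length_pyRange_one]; simp
    simpa [pvStep, h2, pvIterate_step] using h1
  by_cases h0 : n = 0
  · subst h0; simp
  · simp only [h0, if_false, hfold]
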